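-- pv_equiv track=rewrite | github.com/priyanka-golia/barbarik | code/barbarik2.py | getCNF
-- ===== SOURCE A (Python) =====
-- def pushVar(variable, cnfClauses):
--     cnfLen = len(cnfClauses)
--     for i in range(cnfLen):
--         cnfClauses[i].append(variable)
--     return cnfClauses
--
-- def getCNF(variable, binStr, sign, origTotalVars):
--     cnfClauses = []
--     binLen = len(binStr)
--     if sign:
--         cnfClauses.append([binLen + 1 + origTotalVars])
--     else:
--         cnfClauses.append([-(binLen + 1 + origTotalVars)])
--     for i in range(binLen):
--         newVar = int(binLen - i + origTotalVars)
--         if sign == False: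
--             newVar = -1 * (binLen - i + origTotalVars)
--         if binStr[binLen - i - 1] == "0":
--             cnfClauses.append([newVar])
--         else:
--             cnfClauses = pushVar(newVar, cnfClauses)
--     pushVar(variable, cnfClauses)
--     return cnfClauses
-- ===== SOURCE B (Python) =====
-- def getCNF(variable, binStr, sign, origTotalVars):
--     s = 1 if sign else -1
--     binLen = len(binStr)
--     tail = [variable]
--     zeros = []
--     for p, ch in enumerate(binStr):
--         v = s * (p + 1 + origTotalVars)
--         if ch == "0":
--             zeros.append([v] + tail)
--         else:
--             tail = [v] + tail
--     return [[s * (binLen + 1 + origTotalVars)] + tail] + zeros[::-1]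
-- ===== Notes on version B (the rewrite author's own statement) =====
-- stated objective: alternative
-- what changed: Single forward pass that shares a growing tail (1-vars + final variable, built by prepending) and snapshots it for each 0-clause, instead of A's repeated append-to-every-clause broadcasts after each 1-bit and a final broadcast pass.
import Mathlib
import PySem

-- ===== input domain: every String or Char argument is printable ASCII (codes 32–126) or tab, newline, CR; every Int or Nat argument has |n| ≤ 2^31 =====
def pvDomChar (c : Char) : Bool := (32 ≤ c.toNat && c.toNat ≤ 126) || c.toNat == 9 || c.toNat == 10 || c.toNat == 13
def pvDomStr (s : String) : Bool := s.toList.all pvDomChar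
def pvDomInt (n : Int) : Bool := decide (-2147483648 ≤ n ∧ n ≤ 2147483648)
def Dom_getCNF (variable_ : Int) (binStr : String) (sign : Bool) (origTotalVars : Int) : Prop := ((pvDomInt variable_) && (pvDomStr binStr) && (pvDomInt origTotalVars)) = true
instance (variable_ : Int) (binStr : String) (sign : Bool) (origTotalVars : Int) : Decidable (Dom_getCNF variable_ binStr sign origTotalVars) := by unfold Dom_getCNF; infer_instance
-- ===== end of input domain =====

-- B replaces A's repeated append-to-every-clause broadcasts by one forward pass sharing a prepend-built tail; equal return values, proved below.

-- ===== PORT A =====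
def pushVar (variable_ : Int) (cnfClauses : List (List Int)) : List (List Int) :=
  cnfClauses.map (fun c => c ++ [variable_])

def getCNF (variable_ : Int) (binStr : String) (sign : Bool) (origTotalVars : Int) : List (List Int) :=
  let binLen : Int := PySem.Str.len binStr
  let cnf0 : List (List Int) :=
    if sign then [[binLen + 1 + origTotalVars]] else [[-(binLen + 1 + origTotalVars)]]
  let cnf := (PySem.List.pyRange 0 binLen 1).foldl
    (fun cnfClauses i =>
      let newVar : Int :=
        if sign = false then -1 * (binLen - i + origTotalVars) else binLen - i + origTotalVars
      if PySem.Str.pyGet? binStr (binLen - i - 1) = some '0' then cnfClauses ++ [[newVar]]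
      else pushVar newVar cnfClauses) cnf0
  pushVar variable_ cnf

-- ===== PORT B =====
def getCNF_alt (variable_ : Int) (binStr : String) (sign : Bool) (origTotalVars : Int) : List (List Int) :=
  let s : Int := if sign then 1 else -1
  let binLen : Int := PySem.Str.len binStr
  let st := (PySem.List.enumerate binStr.toList 0).foldl
    (fun (st : List Int × List (List Int)) pc =>
      let v : Int := s * (pc.1 + 1 + origTotalVars)
      if pc.2 = '0' then (st.1, st.2 ++ [v :: st.1])
      else (v :: st.1, st.2)) ([variable_], [])
  (s * (binLen + 1 + origTotalVars) :: st.1) :: st.2.reverse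

-- ===== PRECONDITION & SPEC =====
def Spec_getCNF (variable_ : Int) (binStr : String) (sign : Bool) (origTotalVars : Int) (out : List (List Int)) : Prop := out = getCNF_alt variable_ binStr sign origTotalVars
instance (variable_ : Int) (binStr : String) (sign : Bool) (origTotalVars : Int) (out : List (List Int)) : Decidable (Spec_getCNF variable_ binStr sign origTotalVars out) := by unfold Spec_getCNF; infer_instance

-- ===== CLAIM (what is proved, stated in full; the proofs are below) =====
def Claim_equal_getCNF : Prop := ∀ (variable_ : Int) (binStr : String) (sign : Bool) (origTotalVars : Int), Dom_getCNF variable_ binStr sign origTotalVars → Spec_getCNF variable_ binStr sign origTotalVars (getCNF variable_ binStr sign origTotalVars)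

-- ===== LEMMAS AND PROOFS =====

-- Spec functions over the REVERSED character list (head = last character of binStr);
-- the value attached to the head of a reversed suffix `c :: r` is sg*((r.length+1)+otv).
def onesSpec (sg otv : Int) : List Char → List Int
  | [] => []
  | c :: r => if c = '0' then onesSpec sg otv r
              else sg * ((r.length : Int) + 1 + otv) :: onesSpec sg otv r

def zclSpec (sg otv : Int) : List Char → List (List Int)
  | [] => []
  | c :: r => if c = '0' then (sg * ((r.length : Int) + 1 + otv) :: onesSpec sg otv r) :: zclSpec sg otv r
              else zclSpec sg otv r

-- A's loop, rephrased as structural recursion on the reversed character list.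
def goA (sg otv : Int) : List Char → List (List Int) → List (List Int)
  | [], acc => acc
  | c :: r, acc =>
      goA sg otv r (if c = '0' then acc ++ [[sg * ((r.length : Int) + 1 + otv)]]
                    else acc.map (· ++ [sg * ((r.length : Int) + 1 + otv)]))

theorem goA_eq (sg otv : Int) : ∀ (rs : List Char) (acc : List (List Int)),
    goA sg otv rs acc = acc.map (· ++ onesSpec sg otv rs) ++ zclSpec sg otv rs := by
  intro rs
  induction rs with
  | nil => intro acc; simp [goA, onesSpec, zclSpec]
  | cons c r ih =>
    intro acc
    by_cases hc : c = '0' <;>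
      simp [goA, onesSpec, zclSpec, hc, ih, List.map_map, Function.comp, List.append_assoc]

-- A's pyRange loop computes goA on the unprocessed reversed suffix of the characters.
theorem A_loop (sign : Bool) (otv : Int) (binStr : String) :
    ∀ (rs us : List Char) (acc : List (List Int)), us ++ rs = binStr.toList.reverse →
    (PySem.List.pyRange (us.length : Int) (PySem.Str.len binStr) 1).foldl
      (fun cnfClauses i =>
        let newVar : Int :=
          if sign = false then -1 * (PySem.Str.len binStr - i + otv)
          else PySem.Str.len binStr - i + otv
        if PySem.Str.pyGet? binStr (PySem.Str.len binStr - i - 1) = some '0' then cnfClauses ++ [[newVar]]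
        else pushVar newVar cnfClauses) acc
    = goA (if sign then 1 else -1) otv rs acc := by
  have hlen : PySem.Str.len binStr = (binStr.toList.length : Int) := by
    simp [PySem.Str.len_eq]
  intro rs
  induction rs with
  | nil =>
    intro us acc h
    have hsl : binStr.toList.length = binStr.length := String.length_toList
    have hlu : us.length = binStr.toList.length := by
      have := congrArg List.length h; simp at this; omega
    rw [hlen, hlu, PySem.List.pyRange_one_eq_nil (by omega)]
    simp [goA]
  | cons c r ih =>
    intro us acc h
    have hsl : binStr.toList.length = binStr.length := String.length_toList
    have hlu : us.length + (r.length + 1) = binStr.toList.length := by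
      have := congrArg List.length h; simp at this; omega
    rw [PySem.List.pyRange_one_cons (by rw [hlen]; omega)]
    simp only [List.foldl_cons]
    have hget : PySem.Str.pyGet? binStr (PySem.Str.len binStr - (us.length : Int) - 1) = some c := by
      have h1 : PySem.Str.len binStr - (us.length : Int) - 1 = ((r.length : Nat) : Int) := by
        rw [hlen]; omega
      rw [h1, PySem.Str.pyGet?_natCast]
      have h2 : binStr.toList[r.length]? = binStr.toList.reverse[binStr.toList.length - 1 - r.length]? := by
        rw [List.getElem?_reverse (by omega)]
        congr 1; omega
      rw [h2, ← h]
      have h3 : binStr.toList.length - 1 - r.length = us.length := by omega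
      rw [h3]
      simp
    have hvar : (if sign = false then -1 * (PySem.Str.len binStr - (us.length : Int) + otv)
                 else PySem.Str.len binStr - (us.length : Int) + otv)
               = (if sign then (1 : Int) else -1) * ((r.length : Int) + 1 + otv) := by
      have hc : PySem.Str.len binStr - (us.length : Int) = (r.length : Int) + 1 := by
        rw [hlen]; omega
      rw [hc]
      by_cases hs : sign <;> simp [hs]
    have hstep := ih (us ++ [c])
        (if c = '0' then acc ++ [[(if sign then (1:Int) else -1) * ((r.length : Int) + 1 + otv)]]
         else acc.map (· ++ [(if sign then (1:Int) else -1) * ((r.length : Int) + 1 + otv)]))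
        (by simpa using h)
    simp only [List.length_append, List.length_cons, List.length_nil] at hstep
    have hcast : ((us.length + 1 : Nat) : Int) = (us.length : Int) + 1 := by push_cast; ring
    rw [hcast] at hstep
    simp only [hget, goA]
    by_cases hc : c = '0'
    · rw [← hstep]
      congr 1
      simp only [hvar, hc, if_pos]
    · rw [← hstep]
      congr 1
      simp only [hvar]
      simp [hc, pushVar]

-- B's fold invariant: after the processed prefix u, the state is the spec of u.reverse.
theorem B_loop (sg otv variable_ : Int) :
    ∀ (ds u : List Char),
    (PySem.List.enumerate ds (u.length : Int)).foldl
      (fun (st : List Int × List (List Int)) pc =>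
        let v : Int := sg * (pc.1 + 1 + otv)
        if pc.2 = '0' then (st.1, st.2 ++ [v :: st.1])
        else (v :: st.1, st.2))
      (onesSpec sg otv u.reverse ++ [variable_],
       ((zclSpec sg otv u.reverse).map (· ++ [variable_])).reverse)
    = (onesSpec sg otv (u ++ ds).reverse ++ [variable_],
       ((zclSpec sg otv (u ++ ds).reverse).map (· ++ [variable_])).reverse) := by
  intro ds
  induction ds with
  | nil => intro u; simp [PySem.List.enumerate_nil]
  | cons c r ih =>
    intro u
    rw [PySem.List.enumerate_cons, List.foldl_cons]
    have hkey := ih (u ++ [c])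
    simp only [List.length_append, List.length_cons, List.length_nil] at hkey
    have hcast : ((u.length + 1 : Nat) : Int) = (u.length : Int) + 1 := by push_cast; ring
    rw [hcast] at hkey
    have hassoc : (u ++ [c]) ++ r = u ++ (c :: r) := by simp
    rw [hassoc] at hkey
    by_cases hc : c = '0'
    · rw [← hkey]
      congr 1; simp [onesSpec, zclSpec, hc]
    · rw [← hkey]
      congr 1; simp [onesSpec, zclSpec, hc]

-- ===== VERDICT (by name: the statement is the Claim_ definition above) =====
theorem getCNF_spec : Claim_equal_getCNF := by
  intro variable_ binStr sign origTotalVars _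
  unfold Spec_getCNF getCNF getCNF_alt
  simp only []
  have hA := A_loop sign origTotalVars binStr binStr.toList.reverse []
      (if sign then [[PySem.Str.len binStr + 1 + origTotalVars]]
       else [[-(PySem.Str.len binStr + 1 + origTotalVars)]]) (by simp)
  simp only [List.length_nil, Nat.cast_zero] at hA
  rw [hA, goA_eq]
  have hB := B_loop (if sign then (1:Int) else -1) origTotalVars variable_ binStr.toList []
  simp only [List.length_nil, Nat.cast_zero, List.reverse_nil, onesSpec, zclSpec,
    List.map_nil, List.nil_append] at hB
  rw [hB]
  have hbase : (if sign then [[PySem.Str.len binStr + 1 + origTotalVars]]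
       else [[-(PySem.Str.len binStr + 1 + origTotalVars)]])
      = [[(if sign then (1:Int) else -1) * (PySem.Str.len binStr + 1 + origTotalVars)]] := by
    by_cases hs : sign <;> simp [hs]
  rw [hbase]
  simp [pushVar]
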